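-- pv_equiv track=rewrite | github.com/Ad2Am2/random-adair-stuff | data_extraction.py | count_non_empty_cells_per_row
-- ===== SOURCE A (Python) =====
-- def count_non_empty_cells_per_row(row):
--     count = 0
--     first_non_empty_idx = -1
--     for idx, cell in enumerate(row):
--         if cell is not None and cell != '':
--             count += 1
--             if first_non_empty_idx == -1:
--                 first_non_empty_idx = idx
--
--     return first_non_empty_idx, count
-- ===== SOURCE B (Python) =====
-- def count_non_empty_cells_per_row(row):
--     def solve(part, base):
--         n = len(part)
--         if n == 0:
--             return -1, 0
--         if n == 1:
--             cell = part[0]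
--             return (base, 1) if cell is not None and cell != '' else (-1, 0)
--         mid = n // 2
--         fl, cl = solve(part[:mid], base)
--         fr, cr = solve(part[mid:], base + mid)
--         return (fl if fl != -1 else fr, cl + cr)
--     return solve(list(row), 0)
-- ===== Notes on version B (the rewrite author's own statement) =====
-- stated objective: alternative
-- what changed: Replaces A's single left-to-right loop with an incremental count and first-index latch by a divide-and-conquer: split the row at the midpoint, solve each half recursively, and merge (first index = left half's if found else right half's; count = sum of the halves).
import Mathlib
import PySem

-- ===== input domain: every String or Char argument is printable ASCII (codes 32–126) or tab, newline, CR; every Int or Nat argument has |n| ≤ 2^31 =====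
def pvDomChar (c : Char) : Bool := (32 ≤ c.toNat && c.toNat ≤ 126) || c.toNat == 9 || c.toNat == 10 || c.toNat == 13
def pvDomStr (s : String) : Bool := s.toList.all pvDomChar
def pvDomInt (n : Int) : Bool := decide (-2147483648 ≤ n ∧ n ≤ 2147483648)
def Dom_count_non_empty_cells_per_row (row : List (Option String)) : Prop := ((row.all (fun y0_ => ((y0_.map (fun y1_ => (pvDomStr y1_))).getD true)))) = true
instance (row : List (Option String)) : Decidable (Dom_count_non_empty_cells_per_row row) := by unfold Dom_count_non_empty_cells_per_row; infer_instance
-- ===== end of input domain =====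

-- B replaces A's single left-to-right latch-and-count loop by a divide-and-conquer:
-- split the row in half, solve each half, and merge (first = left's first if found
-- else right's, count = sum). Objective: alternative decomposition, same results.

-- ===== PORT A =====
-- Port of A: loop over enumerate(row) latching first index and counting.
def count_non_empty_cells_per_row (row : List (Option String)) : Int × Int :=
  let st := (PySem.List.enumerate row).foldl
    (fun (st : Int × Int) (p : Int × Option String) =>
      match p.2 with
      | none => st
      | some s => if s ≠ "" then
          (st.1 + 1, if st.2 = -1 then p.1 else st.2)
        else st)
    (0, -1)
  (st.2, st.1)

-- ===== PORT B =====
-- Port of B's recursive solve(part, base): split at mid = n // 2, recurse, merge.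
def pvSolve (part : List (Option String)) (base : Int) : Int × Int :=
  if _h0 : part.length = 0 then (-1, 0)
  else if _h1 : part.length = 1 then
    -- cell = part[0] (in range: length = 1)
    match part.headD none with
    | none => (-1, 0)
    | some s => if s ≠ "" then (base, 1) else (-1, 0)
  else
    let mid := part.length / 2
    let (fl, cl) := pvSolve (part.take mid) base
    let (fr, cr) := pvSolve (part.drop mid) (base + (mid : Int))
    (if fl ≠ -1 then fl else fr, cl + cr)
termination_by part.length
decreasing_by
  · simp only [List.length_take]; omega
  · simp only [List.length_drop]; omega

def count_non_empty_cells_per_row_alt (row : List (Option String)) : Int × Int :=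
  pvSolve row 0

-- ===== PRECONDITION & SPEC =====
def Spec_count_non_empty_cells_per_row (row : List (Option String)) (out : Int × Int) : Prop := out = count_non_empty_cells_per_row_alt row
instance (row : List (Option String)) (out : Int × Int) : Decidable (Spec_count_non_empty_cells_per_row row out) := by unfold Spec_count_non_empty_cells_per_row; infer_instance

-- ===== CLAIM (what is proved, stated in full; the proofs are below) =====
def Claim_equal_count_non_empty_cells_per_row : Prop := ∀ (row : List (Option String)), Dom_count_non_empty_cells_per_row row → Spec_count_non_empty_cells_per_row row (count_non_empty_cells_per_row row)

-- ===== LEMMAS AND PROOFS =====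

-- The list of (0-based, offset by b) indices of non-empty cells: the common
-- characterisation both ports are reduced to.
def pvIdxs : List (Option String) → Int → List Int
  | [], _ => []
  | c :: t, b =>
    match c with
    | none => pvIdxs t (b + 1)
    | some s => if s ≠ "" then b :: pvIdxs t (b + 1) else pvIdxs t (b + 1)

theorem pvIdxs_append (l₁ l₂ : List (Option String)) (b : Int) :
    pvIdxs (l₁ ++ l₂) b = pvIdxs l₁ b ++ pvIdxs l₂ (b + l₁.length) := by
  induction l₁ generalizing b with
  | nil => simp [pvIdxs]
  | cons c t ih =>
    cases c with
    | none => simp [pvIdxs, ih]; ring_nf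
    | some s =>
      by_cases hs : s = "" <;> simp [pvIdxs, hs, ih] <;> ring_nf

theorem pvIdxs_ge (l : List (Option String)) (b : Int) :
    ∀ x ∈ pvIdxs l b, b ≤ x := by
  induction l generalizing b with
  | nil => simp [pvIdxs]
  | cons c t ih =>
    intro x hx
    cases c with
    | none =>
      have := ih (b + 1) x (by simpa [pvIdxs] using hx)
      omega
    | some s =>
      by_cases hs : s = ""
      · have := ih (b + 1) x (by simpa [pvIdxs, hs] using hx)
        omega
      · rcases (by simpa [pvIdxs, hs] using hx : x = b ∨ x ∈ pvIdxs t (b + 1)) with h | h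
        · omega
        · have := ih (b + 1) x h; omega

theorem pvSolve_eq (l : List (Option String)) (b : Int) (hb : 0 ≤ b) :
    pvSolve l b = ((pvIdxs l b).headD (-1), ((pvIdxs l b).length : Int)) := by
  induction hn : l.length using Nat.strong_induction_on generalizing l b with
  | _ n ih =>
    match l, hn with
    | [], _ => simp [pvSolve, pvIdxs]
    | [c], _ =>
      cases c with
      | none => simp [pvSolve, pvIdxs]
      | some s => by_cases hs : s = "" <;> simp [pvSolve, pvIdxs, hs]
    | c₁ :: c₂ :: t, hn =>
      rw [pvSolve]
      have hlen : (c₁ :: c₂ :: t).length = n := hn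
      have hn2 : 2 ≤ n := by simp at hlen; omega
      simp only [show ¬ (c₁ :: c₂ :: t).length = 0 by simp,
        show ¬ (c₁ :: c₂ :: t).length = 1 by simp only [List.length_cons]; omega, dif_neg, not_false_iff]
      set L := c₁ :: c₂ :: t with hL
      set mid := L.length / 2 with hmid
      have hmid1 : 1 ≤ mid := by simp [hmid, hL]; omega
      have hmidlt : mid < L.length := by simp [hL] at hmid ⊢; omega
      have htake : (L.take mid).length = mid := by simp; omega
      have hdrop : (L.drop mid).length = L.length - mid := by simp
      rw [ih (L.take mid).length (by omega) _ b hb rfl,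
          ih (L.drop mid).length (by omega) _ (b + (mid : Int)) (by omega) rfl]
      have hsplit : pvIdxs L b = pvIdxs (L.take mid) b ++ pvIdxs (L.drop mid) (b + (mid : Int)) := by
        conv_lhs => rw [← List.take_append_drop mid L]
        rw [pvIdxs_append, htake]
      rw [hsplit]
      cases hcase : pvIdxs (L.take mid) b with
      | nil => simp
      | cons x xs =>
        have hxb : b ≤ x := pvIdxs_ge _ _ x (by rw [hcase]; simp)
        have hx : x ≠ -1 := by omega
        simp [hx]
        ring

-- A-side: the loop body as a named step function.
def pvStep (st : Int × Int) (p : Int × Option String) : Int × Int :=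
  match p.2 with
  | none => st
  | some s => if s ≠ "" then (st.1 + 1, if st.2 = -1 then p.1 else st.2) else st

def pvPick (p : Int × Option String) : Option Int :=
  match p.2 with
  | none => none
  | some s => if s ≠ "" then some p.1 else none

theorem pvEnum_pick (l : List (Option String)) (b : Int) :
    (PySem.List.enumerate l b).filterMap pvPick = pvIdxs l b := by
  induction l generalizing b with
  | nil => simp [pvIdxs]
  | cons c t ih =>
    rw [PySem.List.enumerate_cons, List.filterMap_cons, ih]
    cases c with
    | none => simp [pvPick, pvIdxs]
    | some s => by_cases hs : s = "" <;> simp [pvPick, pvIdxs, hs]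

theorem pvLoop_latched (l : List (Int × Option String)) (c f : Int) (hf : f ≠ -1) :
    l.foldl pvStep (c, f) = (c + (l.filterMap pvPick).length, f) := by
  induction l generalizing c with
  | nil => simp
  | cons p t ih =>
    cases p with
    | mk i o =>
      cases o with
      | none => simpa [pvStep, pvPick] using ih c
      | some s =>
        by_cases hs : s = ""
        · simpa [pvStep, pvPick, hs] using ih c
        · simp [pvStep, pvPick, hs, hf, ih (c + 1)]
          omega

theorem pvLoop_unlatched (l : List (Int × Option String)) (c : Int)
    (hl : ∀ p ∈ l, 0 ≤ p.1) :
    l.foldl pvStep (c, -1) =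
      (c + (l.filterMap pvPick).length, (l.filterMap pvPick).headD (-1)) := by
  induction l generalizing c with
  | nil => simp
  | cons p t ih =>
    cases p with
    | mk i o =>
      have hi : (0:Int) ≤ i := hl (i, o) (by simp)
      have ht : ∀ p ∈ t, 0 ≤ p.1 := fun p hp => hl p (List.mem_cons_of_mem _ hp)
      cases o with
      | none => simpa [pvStep, pvPick] using ih c ht
      | some s =>
        by_cases hs : s = ""
        · simpa [pvStep, pvPick, hs] using ih c ht
        · have hi' : i ≠ -1 := by omega
          simp [pvStep, pvPick, hs, pvLoop_latched t (c + 1) i hi']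
          omega

theorem pvEnum_nonneg (row : List (Option String)) :
    ∀ p ∈ PySem.List.enumerate row 0, 0 ≤ p.1 := by
  intro p hp
  obtain ⟨k, hk, rfl⟩ := (PySem.List.mem_enumerate_iff _ _ _).1 hp
  simp

-- ===== VERDICT (by name: the statement is the Claim_ definition above) =====
theorem count_non_empty_cells_per_row_spec : Claim_equal_count_non_empty_cells_per_row := by
  intro row _
  unfold Spec_count_non_empty_cells_per_row count_non_empty_cells_per_row count_non_empty_cells_per_row_alt
  rw [show (fun (st : Int × Int) (p : Int × Option String) =>
      match p.2 with
      | none => st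
      | some s => if s ≠ "" then (st.1 + 1, if st.2 = -1 then p.1 else st.2) else st) = pvStep from rfl]
  rw [pvLoop_unlatched _ _ (pvEnum_nonneg row), pvEnum_pick,
    pvSolve_eq row 0 le_rfl]
  simp
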